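-- pv_equiv track=rewrite | github.com/networkx/networkx | networkx/algorithms/malicious/draft_ga.py | count_equal_size_combinations
-- ===== SOURCE A (Python) =====
-- from math import comb
--
-- def count_equal_size_combinations(G1_nodes, G2_nodes):
--     # Find the smaller of the two graphs
--     smaller_g = G1_nodes if len(G1_nodes) < len(G2_nodes) else G2_nodes
--
--     # Initialize the count to 0
--     count = 0
--
--     # Iterate over all subgraph sizes from 0 to the size of the smaller graph
--     for i in range(1, len(smaller_g) + 1):
--         # Calculate the number of combinations for g1
--         g1_combinations = comb(len(G1_nodes), i)
--
--         # Calculate the number of combinations for g2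
--         g2_combinations = comb(len(G2_nodes), i)
--
--         # Add the total number of combinations for this size to the count
--         count += g1_combinations * g2_combinations
--
--     return count
-- ===== SOURCE B (Python) =====
-- from math import comb
--
-- def count_equal_size_combinations(G1_nodes, G2_nodes):
--     # Vandermonde's identity: sum_{i>=0} C(n1,i)*C(n2,i) = C(n1+n2, n1);
--     # dropping the i=0 term gives the loop's sum in closed form.
--     return comb(len(G1_nodes) + len(G2_nodes), len(G1_nodes)) - 1
-- ===== Notes on version B (the rewrite author's own statement) =====
-- stated objective: faster
-- what changed: Replaced the loop over subset sizes by the closed form C(n1+n2, n1) - 1 via Vandermonde's identity (one comb call instead of O(min(n1,n2)) of them).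
import Mathlib
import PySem

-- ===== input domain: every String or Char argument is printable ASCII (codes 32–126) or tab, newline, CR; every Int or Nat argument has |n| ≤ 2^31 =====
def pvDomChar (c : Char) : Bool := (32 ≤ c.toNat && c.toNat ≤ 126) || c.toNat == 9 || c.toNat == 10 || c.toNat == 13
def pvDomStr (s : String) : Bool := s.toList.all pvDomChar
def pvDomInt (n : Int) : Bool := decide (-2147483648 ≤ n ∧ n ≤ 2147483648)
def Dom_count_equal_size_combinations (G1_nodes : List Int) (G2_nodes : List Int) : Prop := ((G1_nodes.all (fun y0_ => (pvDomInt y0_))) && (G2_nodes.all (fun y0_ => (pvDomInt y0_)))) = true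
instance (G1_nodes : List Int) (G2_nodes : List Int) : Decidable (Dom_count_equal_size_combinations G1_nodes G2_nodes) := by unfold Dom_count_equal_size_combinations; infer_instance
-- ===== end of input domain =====

-- B replaces A's loop over subset sizes with the closed form C(n1+n2, n1) - 1
-- (Vandermonde's identity); objective: faster (one binomial instead of min(n1,n2)).

-- ===== PORT A =====
-- math.comb(n, k) for the nonnegative arguments A feeds it is Nat.choose.
def count_equal_size_combinations (G1_nodes : List Int) (G2_nodes : List Int) : Int :=
  let smaller_g := if G1_nodes.length < G2_nodes.length then G1_nodes else G2_nodes
  (PySem.List.pyRange 1 ((smaller_g.length : Int) + 1) 1).foldl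
    (fun count i =>
      let g1_combinations : Int := (Nat.choose G1_nodes.length i.toNat : Int)
      let g2_combinations : Int := (Nat.choose G2_nodes.length i.toNat : Int)
      count + g1_combinations * g2_combinations) 0

-- ===== PORT B =====
def count_equal_size_combinations_alt (G1_nodes : List Int) (G2_nodes : List Int) : Int :=
  (Nat.choose (G1_nodes.length + G2_nodes.length) G1_nodes.length : Int) - 1

-- ===== PRECONDITION & SPEC =====
def Spec_count_equal_size_combinations (G1_nodes : List Int) (G2_nodes : List Int) (out : Int) : Prop := out = count_equal_size_combinations_alt G1_nodes G2_nodes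
instance (G1_nodes : List Int) (G2_nodes : List Int) (out : Int) : Decidable (Spec_count_equal_size_combinations G1_nodes G2_nodes out) := by unfold Spec_count_equal_size_combinations; infer_instance

-- ===== CLAIM (what is proved, stated in full; the proofs are below) =====
def Claim_equal_count_equal_size_combinations : Prop := ∀ (G1_nodes : List Int) (G2_nodes : List Int), Dom_count_equal_size_combinations G1_nodes G2_nodes → Spec_count_equal_size_combinations G1_nodes G2_nodes (count_equal_size_combinations G1_nodes G2_nodes)

-- ===== LEMMAS AND PROOFS =====

/-- A's loop as a `Finset.range` sum (folding from 1 to m inclusive). -/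
theorem pv_foldl_range_sum (g : Int → Int) (m : Nat) :
    (PySem.List.pyRange 1 ((m : Int) + 1) 1).foldl (fun c i => c + g i) 0
      = ∑ k ∈ Finset.range m, g ((k : Int) + 1) := by
  induction m with
  | zero => simp [PySem.List.pyRange_one_eq_nil]
  | succ m ih =>
    have h1 : (1 : Int) ≤ (m : Int) + 1 := by omega
    have h2 : ((m + 1 : Nat) : Int) + 1 = ((m : Int) + 1) + 1 := by push_cast; ring
    rw [h2, PySem.List.pyRange_one_succ_right h1, List.foldl_append, ih,
        Finset.sum_range_succ]
    simp [List.foldl]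

/-- Vandermonde, in the symmetric form the task needs. -/
theorem pv_vandermonde_sym (n1 n2 : Nat) :
    (n1 + n2).choose n1 = ∑ k ∈ Finset.range (n1 + 1), n1.choose k * n2.choose k := by
  rw [Nat.add_choose_eq, Finset.Nat.sum_antidiagonal_eq_sum_range_succ_mk,
      ← Finset.sum_range_reflect]
  refine Finset.sum_congr rfl ?_
  intro k hk
  simp only [Finset.mem_range] at hk
  have hk' : k ≤ n1 := by omega
  have e1 : n1 + 1 - 1 - k = n1 - k := by omega
  have e2 : n1 - (n1 - k) = k := by omega
  rw [e1, e2, Nat.choose_symm hk']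

/-- The sum may be truncated at `min n1 n2`: larger terms vanish. -/
theorem pv_sum_truncate (n1 n2 : Nat) :
    ∑ k ∈ Finset.range (min n1 n2 + 1), n1.choose k * n2.choose k
      = ∑ k ∈ Finset.range (n1 + 1), n1.choose k * n2.choose k := by
  apply Finset.sum_subset
  · intro x hx; simp only [Finset.mem_range] at *; omega
  · intro x hx hx'
    simp only [Finset.mem_range] at hx hx'
    have : n2 < x := by omega
    rw [Nat.choose_eq_zero_of_lt this, Nat.mul_zero]

/-- Closed form for the tail sum (i from 1) over the truncated range. -/
theorem pv_closed_form (n1 n2 : Nat) :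
    ((∑ k ∈ Finset.range (min n1 n2), n1.choose (k + 1) * n2.choose (k + 1) : Nat) : Int)
      = ((n1 + n2).choose n1 : Int) - 1 := by
  have hfull : ∑ k ∈ Finset.range (min n1 n2 + 1), n1.choose k * n2.choose k
      = (n1 + n2).choose n1 := by
    rw [pv_sum_truncate, ← pv_vandermonde_sym]
  rw [Finset.sum_range_succ'] at hfull
  have hch : n1.choose 0 * n2.choose 0 = 1 := by simp
  rw [hch] at hfull
  have := congrArg (fun n : Nat => (n : Int)) hfull
  push_cast at this ⊢
  omega

-- ===== VERDICT (by name: the statement is the Claim_ definition above) =====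
theorem count_equal_size_combinations_spec : Claim_equal_count_equal_size_combinations := by
  intro G1 G2 _
  unfold Spec_count_equal_size_combinations
  simp only [count_equal_size_combinations, count_equal_size_combinations_alt]
  have hm : (if G1.length < G2.length then G1 else G2).length = min G1.length G2.length := by
    by_cases h : G1.length < G2.length <;> simp [h] <;> omega
  rw [hm]
  rw [pv_foldl_range_sum (fun i => (Nat.choose G1.length i.toNat : Int) * (Nat.choose G2.length i.toNat : Int)) (min G1.length G2.length)]
  have hterm : ∀ k ∈ Finset.range (min G1.length G2.length),
      (Nat.choose G1.length ((k : Int) + 1).toNat : Int) * (Nat.choose G2.length ((k : Int) + 1).toNat : Int)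
        = ((G1.length.choose (k + 1) * G2.length.choose (k + 1) : Nat) : Int) := by
    intro k _
    have : ((k : Int) + 1).toNat = k + 1 := by omega
    rw [this]; push_cast; ring
  rw [Finset.sum_congr rfl hterm, ← Nat.cast_sum, pv_closed_form]
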